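-- pv_equiv track=rewrite | github.com/naumovda/python | matrices.py | positive_row_product
-- ===== SOURCE A (Python) =====
-- def positive_row_product(matrix):
--     '''
--     Return product of elements of rows without negative elements
--     Parameters:
--         matrix: array
--             Input square matrix
--     '''
--     size = len(matrix)
--     total_prod = 1
--     has_positive = False
--     for i in range(size):
--         prod = 1
--         negative = False
--         for elem in matrix[i]:
--             if elem < 0:
--                 negative = True
--                 break
--             prod *= elem
--         if not negative:
--             total_prod *= prod
--             has_positive = True
--     if has_positive:
--         return total_prod
--     return None
-- ===== SOURCE B (Python) =====
-- def positive_row_product(matrix):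
--     good = [row for row in matrix if all(not (e < 0) for e in row)]
--     if not good:
--         return None
--     total = 1
--     for row in good:
--         p = 1
--         for e in row:
--             p *= e
--         total *= p
--     return total
-- ===== Notes on version B (the rewrite author's own statement) =====
-- stated objective: simpler
-- what changed: Replaces A's fused per-row scan with break and prod/negative/has_positive flags by two phases: a filter selecting rows without negatives, an emptiness test, then one plain product over all elements of the selected rows.
import Mathlib
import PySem

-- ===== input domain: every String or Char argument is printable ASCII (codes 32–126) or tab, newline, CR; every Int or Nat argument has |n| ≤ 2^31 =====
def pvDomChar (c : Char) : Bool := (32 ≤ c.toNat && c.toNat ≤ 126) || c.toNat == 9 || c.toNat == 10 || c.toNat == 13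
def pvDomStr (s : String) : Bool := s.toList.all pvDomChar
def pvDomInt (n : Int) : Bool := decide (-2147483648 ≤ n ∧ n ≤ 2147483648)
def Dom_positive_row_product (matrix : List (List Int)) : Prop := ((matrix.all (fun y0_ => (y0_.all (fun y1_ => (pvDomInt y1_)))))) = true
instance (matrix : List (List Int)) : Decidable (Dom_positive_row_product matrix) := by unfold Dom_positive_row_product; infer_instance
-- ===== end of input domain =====

-- B replaces A's fused scan-with-break and flags by filter (rows without negatives), emptiness test, then a plain product — simpler decomposition, same cost.


-- ===== PORT A =====
-- inner 'for elem in matrix[i]' loop: accumulates prod, breaks on a negative element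
def pvRowScan (acc : Int) : List Int → Int × Bool
  | [] => (acc, false)
  | e :: rest => if e < 0 then (acc, true) else pvRowScan (acc * e) rest

def positive_row_product (matrix : List (List Int)) : Option Int :=
  let st := matrix.foldl (fun (st : Int × Bool) row =>
    let pr := pvRowScan 1 row
    if !pr.2 then (st.1 * pr.1, true) else st) (1, false)
  if st.2 then some st.1 else none

-- ===== PORT B =====
def positive_row_product_alt (matrix : List (List Int)) : Option Int :=
  let good := matrix.filter (fun row => row.all (fun e => !(decide (e < 0))))
  if good.isEmpty then none
  else some (good.foldl (fun t row => t * row.foldl (fun p e => p * e) 1) 1)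

-- ===== PRECONDITION & SPEC =====
def Spec_positive_row_product (matrix : List (List Int)) (out : Option Int) : Prop := out = positive_row_product_alt matrix
instance (matrix : List (List Int)) (out : Option Int) : Decidable (Spec_positive_row_product matrix out) := by unfold Spec_positive_row_product; infer_instance

-- ===== CLAIM (what is proved, stated in full; the proofs are below) =====
def Claim_equal_positive_row_product : Prop := ∀ (matrix : List (List Int)), Dom_positive_row_product matrix → Spec_positive_row_product matrix (positive_row_product matrix)

-- ===== LEMMAS AND PROOFS =====

theorem pvRowScan_snd (row : List Int) (acc : Int) :
    (pvRowScan acc row).2 = !(row.all (fun e => !(decide (e < 0)))) := by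
  induction row generalizing acc with
  | nil => simp [pvRowScan]
  | cons e rest ih =>
    by_cases h : e < 0 <;> simp [pvRowScan, h, ih]

theorem pvRowScan_fst (row : List Int) (acc : Int)
    (h : row.all (fun e => !(decide (e < 0))) = true) :
    (pvRowScan acc row).1 = row.foldl (fun p e => p * e) acc := by
  induction row generalizing acc with
  | nil => simp [pvRowScan]
  | cons e rest ih =>
    simp only [List.all_cons, Bool.and_eq_true] at h
    have he : ¬ e < 0 := by simpa using h.1
    simp [pvRowScan, he, List.foldl_cons, ih _ h.2]

theorem pvAloop_eq (matrix : List (List Int)) (t : Int) (h : Bool) :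
    matrix.foldl (fun (st : Int × Bool) row =>
      let pr := pvRowScan 1 row
      if !pr.2 then (st.1 * pr.1, true) else st) (t, h)
    = ((matrix.filter (fun row => row.all (fun e => !(decide (e < 0))))).foldl
         (fun acc row => acc * row.foldl (fun p e => p * e) 1) t,
       h || !(matrix.filter (fun row => row.all (fun e => !(decide (e < 0))))).isEmpty) := by
  induction matrix generalizing t h with
  | nil => simp
  | cons row rest ih =>
    by_cases hg : row.all (fun e => !(decide (e < 0))) = true
    · have hs := pvRowScan_snd row 1
      rw [hg] at hs
      simp only [List.foldl_cons, List.filter_cons, hg, if_pos trivial]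
      simp only [hs]
      rw [ih]
      rw [pvRowScan_fst row 1 hg]
      simp
    · have hs := pvRowScan_snd row 1
      rw [Bool.not_eq_true] at hg
      rw [hg] at hs
      simp only [List.foldl_cons, List.filter_cons, hg]
      simp only [hs]
      simpa using ih t h

-- ===== VERDICT (by name: the statement is the Claim_ definition above) =====
theorem positive_row_product_spec : Claim_equal_positive_row_product := by
  intro matrix _
  unfold Spec_positive_row_product positive_row_product positive_row_product_alt
  rw [pvAloop_eq]
  simp only [Bool.false_or]
  by_cases he : (matrix.filter (fun row => row.all (fun e => !(decide (e < 0))))).isEmpty = true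
  · simp [he]
  · simp [he]
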